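-- pv_equiv track=rewrite | github.com/udiNaveh/nlvr_tau_nlp_final_proj | seq2seqModel/logical_forms_generation.py | check_types
-- ===== SOURCE A (Python) =====
-- def check_types(required, suggested):
--     '''
--     utility function to check whether the return type of a candidate token
--     matches the type in the top of the stack.
--     :param required: a str or a list of strings representing types in the logical forms.
--     :param suggested: a string representing a type in the logical forms
--     :return: True if the provided return type matches the required type that is in the top of the stack.
--
--     '''
--     if '|' in required:  # if there are several possible required types (e.g. Item and set<Item>)
--         return any([check_types(x, suggested) for x in required.split('|')])
--
--     if required == suggested:
--         return True
--     if required == '?' or suggested == '?':  # wildcard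
--         return True
--     if required.startswith('set') and suggested.startswith('set'):
--         return check_types(required[4:-1], suggested[4:-1])
--     if required.startswith('bool_func') and suggested.startswith('bool_func'):
--         return check_types(required[10:-1], suggested[10:-1])
--
--     return False
-- ===== SOURCE B (Python) =====
-- def _peel(r, s):
--     # iteratively strip matching set<...> / bool_func<...> wrappers; no '|' ever occurs here
--     while True:
--         if r == s or r == '?' or s == '?':
--             return True
--         if r.startswith('set') and s.startswith('set'):
--             r, s = r[4:-1], s[4:-1]
--         elif r.startswith('bool_func') and s.startswith('bool_func'):
--             r, s = r[10:-1], s[10:-1]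
--         else:
--             return False
--
--
-- def check_types(required, suggested):
--     # split pieces contain no '|', and slicing a piece cannot create one,
--     # so one flat any() over the alternatives plus a loop suffices
--     return any(_peel(x, suggested) for x in required.split('|'))
-- ===== Notes on version B (the rewrite author's own statement) =====
-- stated objective: simpler
-- what changed: Replaces A's self-recursion by one flat any() over required.split('|') combined with a non-recursive while-loop that peels matching set<>/bool_func<> wrappers; correct because split pieces contain no '|' and slicing never introduces one, so A's '|' branch can only fire at the top level.
import Mathlib
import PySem

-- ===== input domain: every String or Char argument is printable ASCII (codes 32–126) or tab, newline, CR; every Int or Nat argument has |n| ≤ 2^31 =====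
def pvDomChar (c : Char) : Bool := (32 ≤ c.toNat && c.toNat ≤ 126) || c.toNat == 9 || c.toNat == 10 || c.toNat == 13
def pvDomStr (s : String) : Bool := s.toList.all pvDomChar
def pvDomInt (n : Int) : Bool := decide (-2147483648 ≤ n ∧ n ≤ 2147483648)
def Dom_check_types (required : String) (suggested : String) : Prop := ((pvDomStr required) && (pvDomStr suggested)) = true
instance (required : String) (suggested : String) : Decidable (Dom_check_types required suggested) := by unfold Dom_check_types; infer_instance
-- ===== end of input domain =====

-- B replaces A's self-recursion by one flat any() over required.split('|') plus a
-- non-recursive wrapper-peeling loop (alternative decomposition; no speed claim).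

-- termination helpers (cited by the ports' decreasing_by; they live above the ports by necessity)
theorem pv_go_not_mem (c : Char) (fuel : Nat) :
    ∀ (l cur : List Char) (acc : List (List Char)),
      l.length < fuel → c ∉ cur → (∀ a ∈ acc, c ∉ a) →
      ∀ x ∈ PySem.Chars.splitOn.go [c] fuel l cur acc, c ∉ x := by
  induction fuel with
  | zero => intro l cur acc h; exact absurd h (by omega)
  | succ n ih =>
    intro l cur acc hlen hcur hacc x hx
    match l with
    | [] =>
      simp only [PySem.Chars.splitOn.go] at hx
      rw [List.mem_reverse] at hx
      rcases List.mem_cons.mp hx with h | h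
      · subst h; simpa using hcur
      · exact hacc _ h
    | c' :: rest =>
      simp only [PySem.Chars.splitOn.go] at hx
      by_cases hp : [c].isPrefixOf (c' :: rest) = true
      · rw [if_pos hp] at hx
        have hdrop : rest.length < n := by
          simp at hlen; omega
        refine ih (List.drop [c].length (c' :: rest)) [] (cur.reverse :: acc) ?_ (by simp) ?_ x hx
        · simpa using hdrop
        · intro a ha
          rcases List.mem_cons.mp ha with h | h
          · subst h; simpa using hcur
          · exact hacc _ h
      · rw [if_neg hp] at hx
        have hne : c' ≠ c := by
          intro h; subst h
          simp [List.isPrefixOf] at hp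
        refine ih rest (c' :: cur) acc ?_ ?_ hacc x hx
        · simp at hlen ⊢; omega
        · intro h
          rcases List.mem_cons.mp h with h | h
          · exact hne h.symm
          · exact hcur h

theorem pv_splitOn_not_mem (s : List Char) (c : Char) :
    ∀ x ∈ PySem.Chars.splitOn s [c], c ∉ x := by
  intro x hx
  exact pv_go_not_mem c (s.length + 1) s [] [] (by omega) (by simp) (by simp) x hx

theorem pv_splitOn_count_zero (s : List Char) (c : Char) :
    ∀ x ∈ PySem.Chars.splitOn s [c], x.count c = 0 := by
  intro x hx
  exact List.count_eq_zero.mpr (pv_splitOn_not_mem s c x hx)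

theorem pv_isIn_singleton_mem (c : Char) (s : List Char) :
    PySem.Chars.isIn [c] s = true ↔ c ∈ s := by
  rw [PySem.Chars.isIn_iff_infix]
  constructor
  · intro h; exact h.mem (by simp)
  · intro h
    rcases List.mem_iff_append.mp h with ⟨pre, suf, rfl⟩
    exact ⟨pre, suf, by simp⟩

theorem pv_count_pos_of_isIn (s : List Char) (h : PySem.Chars.isIn ['|'] s = true) :
    0 < s.count '|' := by
  exact List.count_pos_iff.mpr ((pv_isIn_singleton_mem _ _).mp h)

theorem pv_count_zero_of_not_isIn (s : List Char) (h : PySem.Chars.isIn ['|'] s = false) :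
    s.count '|' = 0 := by
  refine List.count_eq_zero.mpr ?_
  intro hmem
  rw [(pv_isIn_singleton_mem '|' s).mpr hmem] at h
  exact absurd h (by simp)

theorem pv_slice_count_zero (s : List Char) (a b : Option Int)
    (h : s.count '|' = 0) : (PySem.List.slice s a b).count '|' = 0 := by
  refine List.count_eq_zero.mpr ?_
  intro hmem
  exact absurd (PySem.List.mem_of_mem_slice s a b hmem) (List.count_eq_zero.mp h)

theorem pv_slice_len_lt (s : List Char) (a : Int) (hs : 0 < s.length) :
    (PySem.List.slice s (some a) (some (-1))).length < s.length := by
  rw [PySem.List.length_slice]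
  have h1 : PySem.List.clampIdx s.length (-1) = s.length - 1 := PySem.List.clampIdx_neg_one s.length
  rw [h1]
  omega

theorem pv_startswith_len (s p : List Char) (h : PySem.Chars.startswith s p = true) :
    p.length ≤ s.length := by
  exact ((PySem.Chars.startswith_iff s p).mp h).length_le

-- ===== PORT A =====
-- faithful transliteration of A's recursion, on the character lists of the two strings
def ctA (req sug : List Char) : Bool :=
  if hbar : PySem.Chars.isIn ['|'] req then
    ((PySem.Chars.splitOn req ['|']).attach.map (fun x => ctA x.1 sug)).any (fun b => b)
  else if req == sug then true
  else if req == ['?'] || sug == ['?'] then true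
  else if hset : PySem.Chars.startswith req ['s','e','t'] && PySem.Chars.startswith sug ['s','e','t'] then
    ctA (PySem.List.slice req (some 4) (some (-1))) (PySem.List.slice sug (some 4) (some (-1)))
  else if hbf : PySem.Chars.startswith req ['b','o','o','l','_','f','u','n','c'] && PySem.Chars.startswith sug ['b','o','o','l','_','f','u','n','c'] then
    ctA (PySem.List.slice req (some 10) (some (-1))) (PySem.List.slice sug (some 10) (some (-1)))
  else false
termination_by (req.count '|', req.length)
decreasing_by
  · exact Prod.Lex.left _ _ (by
      have h0 := pv_splitOn_count_zero req '|' x.1 x.2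
      have h1 := pv_count_pos_of_isIn req hbar
      omega)
  · have hz := pv_count_zero_of_not_isIn req (by simpa using hbar)
    have hz2 := pv_slice_count_zero req (some 4) (some (-1)) hz
    have hlen : 0 < req.length := by
      have := pv_startswith_len req ['s','e','t'] (by
        simp only [Bool.and_eq_true] at hset; exact hset.1)
      simp at this; omega
    have := pv_slice_len_lt req 4 hlen
    rw [hz, hz2]
    exact Prod.Lex.right _ this
  · have hz := pv_count_zero_of_not_isIn req (by simpa using hbar)
    have hz2 := pv_slice_count_zero req (some 10) (some (-1)) hz
    have hlen : 0 < req.length := by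
      have := pv_startswith_len req ['b','o','o','l','_','f','u','n','c'] (by
        simp only [Bool.and_eq_true] at hbf; exact hbf.1)
      simp at this; omega
    have := pv_slice_len_lt req 10 hlen
    rw [hz, hz2]
    exact Prod.Lex.right _ this

def check_types (required : String) (suggested : String) : Bool :=
  ctA required.toList suggested.toList

-- ===== PORT B =====
-- B's while-loop: peel matching set<>/bool_func<> wrappers off a single alternative
def pvPeel (r s : List Char) : Bool :=
  if r == s || r == ['?'] || s == ['?'] then true
  else if hset : PySem.Chars.startswith r ['s','e','t'] && PySem.Chars.startswith s ['s','e','t'] then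
    pvPeel (PySem.List.slice r (some 4) (some (-1))) (PySem.List.slice s (some 4) (some (-1)))
  else if hbf : PySem.Chars.startswith r ['b','o','o','l','_','f','u','n','c'] && PySem.Chars.startswith s ['b','o','o','l','_','f','u','n','c'] then
    pvPeel (PySem.List.slice r (some 10) (some (-1))) (PySem.List.slice s (some 10) (some (-1)))
  else false
termination_by r.length
decreasing_by
  · exact pv_slice_len_lt r 4 (by
      have := pv_startswith_len r ['s','e','t'] (by
        simp only [Bool.and_eq_true] at hset; exact hset.1)
      simp at this; omega)
  · exact pv_slice_len_lt r 10 (by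
      have := pv_startswith_len r ['b','o','o','l','_','f','u','n','c'] (by
        simp only [Bool.and_eq_true] at hbf; exact hbf.1)
      simp at this; omega)

-- B's body: any() over the '|'-split alternatives
def check_types_alt (required : String) (suggested : String) : Bool :=
  (PySem.Chars.splitOn required.toList ['|']).any (fun x => pvPeel x suggested.toList)

-- ===== PRECONDITION & SPEC =====
def Spec_check_types (required : String) (suggested : String) (out : Bool) : Prop := out = check_types_alt required suggested
instance (required : String) (suggested : String) (out : Bool) : Decidable (Spec_check_types required suggested out) := by unfold Spec_check_types; infer_instance

-- ===== CLAIM (what is proved, stated in full; the proofs are below) =====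
def Claim_equal_check_types : Prop := ∀ (required : String) (suggested : String), Dom_check_types required suggested → Spec_check_types required suggested (check_types required suggested)

-- ===== LEMMAS AND PROOFS =====

-- splitOn.go on a list free of the separator returns the single remaining piece
theorem pv_go_no_sep (c : Char) (fuel : Nat) :
    ∀ (l cur : List Char) (acc : List (List Char)),
      l.length < fuel → c ∉ l →
      PySem.Chars.splitOn.go [c] fuel l cur acc = ((cur.reverse ++ l) :: acc).reverse := by
  induction fuel with
  | zero => intro l cur acc h; exact absurd h (by omega)
  | succ n ih =>
    intro l cur acc hlen hmem
    match l with
    | [] => simp [PySem.Chars.splitOn.go]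
    | c' :: rest =>
      have hne : c' ≠ c := fun h => hmem (h ▸ List.mem_cons_self)
      have hp : [c].isPrefixOf (c' :: rest) = false := by
        simp [List.isPrefixOf, Ne.symm hne]
      simp only [PySem.Chars.splitOn.go, hp, Bool.false_eq_true, if_false]
      rw [ih rest (c' :: cur) acc (by simp at hlen ⊢; omega)
            (fun h => hmem (List.mem_cons_of_mem _ h))]
      simp

-- splitting on an absent separator yields the whole string
theorem pv_splitOn_no_sep (s : List Char) (c : Char) (h : c ∉ s) :
    PySem.Chars.splitOn s [c] = [s] := by
  unfold PySem.Chars.splitOn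
  rw [pv_go_no_sep c (s.length + 1) s [] [] (by omega) h]
  simp

-- on '|'-free inputs A's recursion is exactly B's peeling loop
theorem pv_ctA_eq_peel (r s : List Char) (h : r.count '|' = 0) :
    ctA r s = pvPeel r s := by
  induction r, s using pvPeel.induct with
  | case1 r s htrue =>
    have hbar : PySem.Chars.isIn ['|'] r = false := by
      by_contra hc
      have := pv_count_pos_of_isIn r (by simpa using hc)
      omega
    rw [ctA, dif_neg (by simp [hbar]), pvPeel, if_pos htrue]
    split_ifs with a b
    · rfl
    · rfl
    all_goals
      exfalso
      simp only [Bool.or_eq_true, beq_iff_eq] at htrue a b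
      tauto
  | case2 r s hfalse hset ih =>
    have hbar : PySem.Chars.isIn ['|'] r = false := by
      by_contra hc
      have := pv_count_pos_of_isIn r (by simpa using hc)
      omega
    have h1 : ¬((r == s) = true) := fun hh => hfalse (by rw [hh]; simp)
    have h2 : ¬((r == ['?'] || s == ['?']) = true) := fun hh =>
      hfalse (by simp only [Bool.or_eq_true] at hh ⊢; tauto)
    rw [ctA, dif_neg (by simp [hbar]), if_neg h1, if_neg h2, dif_pos hset,
        pvPeel, if_neg hfalse, dif_pos hset]
    exact ih (pv_slice_count_zero r (some 4) (some (-1)) h)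
  | case3 r s hfalse hset hbf ih =>
    have hbar : PySem.Chars.isIn ['|'] r = false := by
      by_contra hc
      have := pv_count_pos_of_isIn r (by simpa using hc)
      omega
    have h1 : ¬((r == s) = true) := fun hh => hfalse (by rw [hh]; simp)
    have h2 : ¬((r == ['?'] || s == ['?']) = true) := fun hh =>
      hfalse (by simp only [Bool.or_eq_true] at hh ⊢; tauto)
    rw [ctA, dif_neg (by simp [hbar]), if_neg h1, if_neg h2, dif_neg hset, dif_pos hbf,
        pvPeel, if_neg hfalse, dif_neg hset, dif_pos hbf]
    exact ih (pv_slice_count_zero r (some 10) (some (-1)) h)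
  | case4 r s hfalse hset hbf =>
    have hbar : PySem.Chars.isIn ['|'] r = false := by
      by_contra hc
      have := pv_count_pos_of_isIn r (by simpa using hc)
      omega
    have h1 : ¬((r == s) = true) := fun hh => hfalse (by rw [hh]; simp)
    have h2 : ¬((r == ['?'] || s == ['?']) = true) := fun hh =>
      hfalse (by simp only [Bool.or_eq_true] at hh ⊢; tauto)
    rw [ctA, dif_neg (by simp [hbar]), if_neg h1, if_neg h2, dif_neg hset, dif_neg hbf,
        pvPeel, if_neg hfalse, dif_neg hset, dif_neg hbf]

-- A's top level equals B's flat any over the split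
theorem pv_ctA_eq_any (req sug : List Char) :
    ctA req sug = (PySem.Chars.splitOn req ['|']).any (fun x => pvPeel x sug) := by
  by_cases hbar : PySem.Chars.isIn ['|'] req = true
  · rw [ctA, dif_pos hbar, Bool.eq_iff_iff]
    simp only [List.any_map, Function.comp_def, List.any_eq_true, List.mem_attach, true_and,
      Subtype.exists]
    constructor
    · rintro ⟨x, hx, hv⟩
      exact ⟨x, hx, by rw [← pv_ctA_eq_peel x sug (pv_splitOn_count_zero req '|' x hx)]; exact hv⟩
    · rintro ⟨x, hx, hv⟩
      exact ⟨x, hx, by rw [pv_ctA_eq_peel x sug (pv_splitOn_count_zero req '|' x hx)]; exact hv⟩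
  · have hmem : '|' ∉ req := fun h =>
      hbar ((pv_isIn_singleton_mem '|' req).mpr h)
    rw [pv_splitOn_no_sep req '|' hmem]
    simp only [List.any_cons, List.any_nil, Bool.or_false]
    exact pv_ctA_eq_peel req sug (List.count_eq_zero.mpr hmem)

-- ===== VERDICT (by name: the statement is the Claim_ definition above) =====
theorem check_types_spec : Claim_equal_check_types := by
  intro required suggested _
  unfold Spec_check_types check_types check_types_alt
  exact pv_ctA_eq_any required.toList suggested.toList
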